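-- pv_equiv track=rewrite | github.com/suraj021617/smartsuraj | utils/app_grid.py | generate_4x4_grid
-- ===== SOURCE A (Python) =====
-- def _to_str4(number_str):
--     """Ensure input is string of length 4 (pad if needed)."""
--     s = str(number_str)
--     if len(s) < 4:
--         s = s.zfill(4)
--     return s
--
-- def generate_4x4_grid(number_str):
--     """
--     Main grid (+1 progression)
--     Row1 = original number (unchanged)
--     Row2 = formula_map applied
--     Row3 = Row2 + 1 (wraparound %10)
--     Row4 = Row3 + 1 (wraparound %10)
--     """
--     number_str = _to_str4(number_str)
--
--     formula_map = {
--         '0': 5, '1': 6, '2': 7, '3': 8, '4': 9,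
--         '5': 0, '6': 1, '7': 2, '8': 3, '9': 4
--     }
--
--     # Row1: original number (fresh list)
--     row1 = [int(d) for d in number_str]
--
--     # Row2: formula map fully applied (fresh list)
--     row2 = [formula_map[d] for d in number_str]
--
--     # Row3: row2 + 1 (wraparound) -> create new list from row2 values (do not mutate row2)
--     row3 = [ (x + 1) % 10 for x in row2 ]
--
--     # Row4: row3 + 1 (wraparound)
--     row4 = [ (x + 1) % 10 for x in row3 ]
--
--     return [row1, row2, row3, row4]
-- ===== SOURCE B (Python) =====
-- def _to_str4(number_str):
--     """Ensure input is string of length 4 (pad if needed)."""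
--     s = str(number_str)
--     if len(s) < 4:
--         s = s.zfill(4)
--     return s
--
-- # Full precomputed column for each digit d: (d, (d+5)%10, (d+6)%10, (d+7)%10).
-- _COLUMNS = {
--     '0': (0, 5, 6, 7), '1': (1, 6, 7, 8), '2': (2, 7, 8, 9), '3': (3, 8, 9, 0),
--     '4': (4, 9, 0, 1), '5': (5, 0, 1, 2), '6': (6, 1, 2, 3), '7': (7, 2, 3, 4),
--     '8': (8, 3, 4, 5), '9': (9, 4, 5, 6),
-- }
--
-- def generate_4x4_grid(number_str):
--     s = _to_str4(number_str)
--     cols = [_COLUMNS[d] for d in s]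
--     return [list(row) for row in zip(*cols)]
-- ===== Notes on version B (the rewrite author's own statement) =====
-- stated objective: alternative
-- what changed: B is column-oriented: a single precomputed 10-entry table maps each digit character to its entire 4-entry grid column, and the grid is obtained by one lookup per digit followed by a transpose (zip), instead of A's row-by-row construction with a digit->digit formula_map and chained +1 derivations of rows 3 and 4.
import Mathlib
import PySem

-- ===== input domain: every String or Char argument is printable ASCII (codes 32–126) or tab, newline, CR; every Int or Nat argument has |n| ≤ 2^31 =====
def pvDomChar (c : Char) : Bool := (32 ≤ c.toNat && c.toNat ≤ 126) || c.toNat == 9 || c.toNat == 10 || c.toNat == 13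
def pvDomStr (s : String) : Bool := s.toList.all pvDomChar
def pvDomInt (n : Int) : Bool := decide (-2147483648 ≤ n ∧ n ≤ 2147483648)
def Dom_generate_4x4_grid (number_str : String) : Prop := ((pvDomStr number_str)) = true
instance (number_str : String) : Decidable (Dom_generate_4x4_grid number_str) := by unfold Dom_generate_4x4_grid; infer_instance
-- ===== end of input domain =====

-- B is column-oriented: one table lookup per digit yields its whole 4-entry column,
-- then the columns are transposed — instead of A's row-by-row formula_map + chained
-- +1 rows (objective: alternative).

-- ===== PORT A =====
-- _to_str4 (shared helper: identical in Source A and Source B)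
def pvToStr4 (number_str : String) : List Char :=
  let s := number_str.toList
  if s.length < 4 then PySem.Chars.zfill s 4 else s

def pvFormulaMap : PySem.Dict Char Int :=
  PySem.Dict.ofList [('0', 5), ('1', 6), ('2', 7), ('3', 8), ('4', 9),
                     ('5', 0), ('6', 1), ('7', 2), ('8', 3), ('9', 4)]

def generate_4x4_grid (number_str : String) : List (List Int) :=
  let s := pvToStr4 number_str
  let row1 := s.map (fun d => (PySem.Int.ofChars? [d]).getD 0)
  let row2 := s.map (fun d => (pvFormulaMap.get? d).getD 0)
  let row3 := row2.map (fun x => PySem.Int.mod (x + 1) 10)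
  let row4 := row3.map (fun x => PySem.Int.mod (x + 1) 10)
  [row1, row2, row3, row4]

-- ===== PORT B =====
-- _COLUMNS: each digit char mapped to its whole 4-tuple column
def pvColumns : PySem.Dict Char (Int × Int × Int × Int) :=
  PySem.Dict.ofList
    [('0', (0, 5, 6, 7)), ('1', (1, 6, 7, 8)), ('2', (2, 7, 8, 9)), ('3', (3, 8, 9, 0)),
     ('4', (4, 9, 0, 1)), ('5', (5, 0, 1, 2)), ('6', (6, 1, 2, 3)), ('7', (7, 2, 3, 4)),
     ('8', (8, 3, 4, 5)), ('9', (9, 4, 5, 6))]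

def generate_4x4_grid_alt (number_str : String) : List (List Int) :=
  let s := pvToStr4 number_str
  let cols := s.map (fun d => (pvColumns.get? d).getD (0, 0, 0, 0))
  -- zip(*cols) on 4-tuples: the i-th row is the list of i-th components
  [cols.map (·.1), cols.map (·.2.1), cols.map (·.2.2.1), cols.map (·.2.2.2)]

-- ===== PRECONDITION & SPEC =====
-- Pre_ excludes exactly the inputs on which A raises (ValueError/KeyError on any
-- non-digit character); A returns normally iff every character is an ASCII digit.
def Pre_generate_4x4_grid (number_str : String) : Prop :=
  number_str.toList.all PySem.Chars.isdigit = true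
instance (number_str : String) : Decidable (Pre_generate_4x4_grid number_str) := by unfold Pre_generate_4x4_grid; infer_instance

def pvWitness_generate_4x4_grid : String := "1234"

def Spec_generate_4x4_grid (number_str : String) (out : List (List Int)) : Prop := out = generate_4x4_grid_alt number_str
instance (number_str : String) (out : List (List Int)) : Decidable (Spec_generate_4x4_grid number_str out) := by unfold Spec_generate_4x4_grid; infer_instance

-- ===== CLAIM (what is proved, stated in full; the proofs are below) =====
def Claim_equal_generate_4x4_grid : Prop := ∀ (number_str : String), Dom_generate_4x4_grid number_str → Pre_generate_4x4_grid number_str → Spec_generate_4x4_grid number_str (generate_4x4_grid number_str)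

-- ===== LEMMAS AND PROOFS =====

-- A digit character is one of the ten literals.
theorem pv_digit_enum (c : Char) (h : PySem.Chars.isdigit c = true) :
    c = '0' ∨ c = '1' ∨ c = '2' ∨ c = '3' ∨ c = '4' ∨
    c = '5' ∨ c = '6' ∨ c = '7' ∨ c = '8' ∨ c = '9' := by
  simp only [PySem.Chars.isdigit, Bool.and_eq_true, decide_eq_true_eq] at h
  obtain ⟨h1, h2⟩ := h
  have hl : 48 ≤ c.toNat := h1
  have hr : c.toNat ≤ 57 := h2
  have hc : Char.ofNat c.toNat = c := Char.ofNat_toNat c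
  set n := c.toNat with hn
  rw [← hc]
  interval_cases n <;> simp

-- zfill of an all-digit list is all digits
theorem pv_zfill_digits (cs : List Char) (h : ∀ c ∈ cs, PySem.Chars.isdigit c = true) :
    ∀ c ∈ PySem.Chars.zfill cs 4, PySem.Chars.isdigit c = true := by
  intro c hc
  unfold PySem.Chars.zfill at hc
  split at hc
  · exact h c hc
  · match cs, h with
    | [], _ =>
      simp at hc
      subst hc; decide
    | d :: rest, h =>
      simp only at hc
      split at hc
      · rename_i hpm
        rcases hpm with rfl | rfl
        · exact absurd (h '+' (by simp)) (by decide)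
        · exact absurd (h '-' (by simp)) (by decide)
      · rcases List.mem_append.mp hc with hmem | hmem
        · have := List.eq_of_mem_replicate hmem; subst this; decide
        · exact h c hmem

theorem pv_toStr4_digits (s : String) (h : s.toList.all PySem.Chars.isdigit = true) :
    ∀ c ∈ pvToStr4 s, PySem.Chars.isdigit c = true := by
  have h' : ∀ c ∈ s.toList, PySem.Chars.isdigit c = true := by
    simpa [List.all_eq_true] using h
  unfold pvToStr4
  dsimp only
  split
  · exact pv_zfill_digits _ h'
  · exact h'

-- per-character equalities: A's four row entries equal the four components of B's column
theorem pv_row1_char (c : Char) (h : PySem.Chars.isdigit c = true) :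
    (PySem.Int.ofChars? [c]).getD 0 = ((pvColumns.get? c).getD (0, 0, 0, 0)).1 := by
  rcases pv_digit_enum c h with rfl|rfl|rfl|rfl|rfl|rfl|rfl|rfl|rfl|rfl <;> decide

theorem pv_row2_char (c : Char) (h : PySem.Chars.isdigit c = true) :
    (pvFormulaMap.get? c).getD 0 = ((pvColumns.get? c).getD (0, 0, 0, 0)).2.1 := by
  rcases pv_digit_enum c h with rfl|rfl|rfl|rfl|rfl|rfl|rfl|rfl|rfl|rfl <;> decide

theorem pv_row3_char (c : Char) (h : PySem.Chars.isdigit c = true) :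
    PySem.Int.mod ((pvFormulaMap.get? c).getD 0 + 1) 10
      = ((pvColumns.get? c).getD (0, 0, 0, 0)).2.2.1 := by
  rcases pv_digit_enum c h with rfl|rfl|rfl|rfl|rfl|rfl|rfl|rfl|rfl|rfl <;> decide

theorem pv_row4_char (c : Char) (h : PySem.Chars.isdigit c = true) :
    PySem.Int.mod (PySem.Int.mod ((pvFormulaMap.get? c).getD 0 + 1) 10 + 1) 10
      = ((pvColumns.get? c).getD (0, 0, 0, 0)).2.2.2 := by
  rcases pv_digit_enum c h with rfl|rfl|rfl|rfl|rfl|rfl|rfl|rfl|rfl|rfl <;> decide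

-- ===== VERDICT (by name: the statement is the Claim_ definition above) =====
theorem generate_4x4_grid_spec : Claim_equal_generate_4x4_grid := by
  intro ns _ hpre
  unfold Spec_generate_4x4_grid
  have hall : ∀ c ∈ pvToStr4 ns, PySem.Chars.isdigit c = true := pv_toStr4_digits ns hpre
  unfold generate_4x4_grid generate_4x4_grid_alt
  simp only [List.map_cons, List.map_nil, List.map_map, List.cons.injEq, and_true]
  refine ⟨?_, ?_, ?_, ?_⟩
  · exact List.map_congr_left fun c hc => pv_row1_char c (hall c hc)
  · exact List.map_congr_left fun c hc => pv_row2_char c (hall c hc)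
  · exact List.map_congr_left fun c hc => pv_row3_char c (hall c hc)
  · exact List.map_congr_left fun c hc => pv_row4_char c (hall c hc)
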